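-- pv_equiv track=rewrite | github.com/rodrigossbjj/Estrutura-Dados | recursao.py | removeImpares
-- ===== SOURCE A (Python) =====
-- def removeImpares(n):
--     if n < 10:
--         if n%2!=0:
--             return 0
--         return n
--
--     if (n%10) % 2 != 0:
--         return removeImpares(n // 10)
--     else:
--         return removeImpares(n // 10) * 10 + (n%10)
-- ===== SOURCE B (Python) =====
-- def removeImpares(n):
--     if n < 10:
--         return 0 if n % 2 != 0 else n
--     result = 0
--     place = 1
--     m = n
--     while m > 0:
--         d = m % 10
--         if d % 2 == 0:
--             result += d * place
--             place *= 10
--         m //= 10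
--     return result
-- ===== Notes on version B (the rewrite author's own statement) =====
-- stated objective: alternative
-- what changed: Replaced the right-to-left recursion (combining results on the way out) with a single iterative while loop over the digits least-significant-first that accumulates kept even digits with an explicit place-value multiplier.
import Mathlib
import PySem

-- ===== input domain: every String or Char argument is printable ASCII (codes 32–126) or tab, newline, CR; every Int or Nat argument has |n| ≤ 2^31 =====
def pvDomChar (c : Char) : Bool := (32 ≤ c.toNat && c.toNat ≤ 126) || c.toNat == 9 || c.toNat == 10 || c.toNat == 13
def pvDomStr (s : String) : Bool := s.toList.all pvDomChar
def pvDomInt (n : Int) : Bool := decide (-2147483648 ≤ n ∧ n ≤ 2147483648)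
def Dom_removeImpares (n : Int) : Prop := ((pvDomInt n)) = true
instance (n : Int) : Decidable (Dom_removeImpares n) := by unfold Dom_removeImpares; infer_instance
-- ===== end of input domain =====

-- B replaces A's right-to-left recursion by a single least-significant-first loop with a
-- place-value accumulator (objective: alternative decomposition, same cost).

-- ===== PORT A =====
def removeImpares (n : Int) : Int :=
  if n < 10 then
    if PySem.Int.mod n 2 ≠ 0 then 0 else n
  else
    if PySem.Int.mod (PySem.Int.mod n 10) 2 ≠ 0 then
      removeImpares (PySem.Int.floordiv n 10)
    else
      removeImpares (PySem.Int.floordiv n 10) * 10 + PySem.Int.mod n 10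
termination_by n.toNat
decreasing_by
  all_goals
    simp only [PySem.Int.floordiv_eq_ediv_of_pos (by norm_num : (0:Int) < 10)]
    omega

-- ===== PORT B =====
-- the 'while m > 0' loop of Source B, state (m, place, result)
def removeImparesLoop (m place result : Int) : Int :=
  if m ≤ 0 then result
  else
    if PySem.Int.mod (PySem.Int.mod m 10) 2 = 0 then
      removeImparesLoop (PySem.Int.floordiv m 10) (place * 10) (result + PySem.Int.mod m 10 * place)
    else
      removeImparesLoop (PySem.Int.floordiv m 10) place result
termination_by m.toNat
decreasing_by
  all_goals
    simp only [PySem.Int.floordiv_eq_ediv_of_pos (by norm_num : (0:Int) < 10)]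
    omega

def removeImpares_alt (n : Int) : Int :=
  if n < 10 then
    if PySem.Int.mod n 2 ≠ 0 then 0 else n
  else
    removeImparesLoop n 1 0

-- ===== PRECONDITION & SPEC =====
def Spec_removeImpares (n : Int) (out : Int) : Prop := out = removeImpares_alt n
instance (n : Int) (out : Int) : Decidable (Spec_removeImpares n out) := by unfold Spec_removeImpares; infer_instance

-- ===== CLAIM (what is proved, stated in full; the proofs are below) =====
def Claim_equal_removeImpares : Prop := ∀ (n : Int), Dom_removeImpares n → Spec_removeImpares n (removeImpares n)

-- ===== LEMMAS AND PROOFS =====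

-- Loop invariant: for positive m the loop adds A's result, scaled by the current place, to result.
lemma removeImparesLoop_eq (k : Nat) : ∀ (m place result : Int), m.toNat ≤ k → 1 ≤ m →
    removeImparesLoop m place result = removeImpares m * place + result := by
  induction k with
  | zero => intro m _ _ hk hm; omega
  | succ k ih =>
    intro m place result hk hm
    have h10 : (0:Int) < 10 := by norm_num
    have hms : ¬ m ≤ 0 := by omega
    rw [removeImparesLoop, if_neg hms]
    by_cases hs : m < 10
    · -- single digit: the recursive calls hit m / 10 = 0
      have hmod : PySem.Int.mod m 10 = m := by
        rw [PySem.Int.mod_eq_emod_of_pos h10]; omega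
      have hdiv : PySem.Int.floordiv m 10 = 0 := by
        rw [PySem.Int.floordiv_eq_ediv_of_pos h10]; omega
      rw [removeImpares, if_pos hs, hmod, hdiv]
      by_cases hpar : PySem.Int.mod m 2 = 0
      · rw [if_pos hpar, removeImparesLoop, if_pos le_rfl, if_neg (not_not_intro hpar)]
        ring
      · rw [if_neg hpar, removeImparesLoop, if_pos le_rfl, if_pos hpar]
        ring
    · -- m ≥ 10: one digit is consumed; apply the invariant to m // 10
      have hm' : 1 ≤ PySem.Int.floordiv m 10 := by
        rw [PySem.Int.floordiv_eq_ediv_of_pos h10]; omega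
      have hk' : (PySem.Int.floordiv m 10).toNat ≤ k := by
        rw [PySem.Int.floordiv_eq_ediv_of_pos h10]; omega
      rw [removeImpares, if_neg hs]
      by_cases hpar : PySem.Int.mod (PySem.Int.mod m 10) 2 = 0
      · rw [if_pos hpar, if_neg (not_not_intro hpar),
            ih _ _ _ hk' hm']
        ring
      · rw [if_neg hpar, if_pos hpar, ih _ _ _ hk' hm']

-- ===== VERDICT (by name: the statement is the Claim_ definition above) =====
theorem removeImpares_spec : Claim_equal_removeImpares := by
  intro n _
  unfold Spec_removeImpares removeImpares_alt
  by_cases hs : n < 10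
  · rw [if_pos hs, removeImpares, if_pos hs]
  · rw [if_neg hs, removeImparesLoop_eq n.toNat n 1 0 le_rfl (by omega)]
    ring
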